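-- pv_equiv track=rewrite | github.com/apu52/DSA_CONTESTS | CodeChef_Starters 162/Adjacent Sum Array.py | solve_adjacent_sum
-- ===== SOURCE A (Python) =====
-- def solve_adjacent_sum(N, B):
--
--     B.sort()
--
--
--     for first in range(1, B[0]):
--
--         A = [first]
--         is_valid = True
--
--
--         for i in range(N-1):
--
--             next_elem = B[i] - A[-1]
--
--
--             if next_elem <= 0:
--                 is_valid = False
--                 break
--
--             A.append(next_elem)
--
--
--         if is_valid and len(A) == N:
--             return A
--
--
--     return None
-- ===== SOURCE B (Python) =====
-- def solve_adjacent_sum(N, B):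
--     # After sorting, first = 1 is always feasible when B[0] >= 2
--     # (each constructed element stays strictly below the next B value), so no search is needed.
--     B.sort()
--     if N < 1 or not B or B[0] < 2:
--         return None
--     res = [1]
--     prev = 1
--     for b in B[:N - 1]:
--         prev = b - prev
--         res.append(prev)
--     return res
-- ===== Notes on version B (the rewrite author's own statement) =====
-- stated objective: simpler
-- what changed: Replaces A's search over candidate first elements (each checked by rebuilding the array with a validity flag) with a single unconditional greedy pass starting at first=1, justified by the invariant that sortedness makes first=1 always feasible when B[0] >= 2.
import Mathlib
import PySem

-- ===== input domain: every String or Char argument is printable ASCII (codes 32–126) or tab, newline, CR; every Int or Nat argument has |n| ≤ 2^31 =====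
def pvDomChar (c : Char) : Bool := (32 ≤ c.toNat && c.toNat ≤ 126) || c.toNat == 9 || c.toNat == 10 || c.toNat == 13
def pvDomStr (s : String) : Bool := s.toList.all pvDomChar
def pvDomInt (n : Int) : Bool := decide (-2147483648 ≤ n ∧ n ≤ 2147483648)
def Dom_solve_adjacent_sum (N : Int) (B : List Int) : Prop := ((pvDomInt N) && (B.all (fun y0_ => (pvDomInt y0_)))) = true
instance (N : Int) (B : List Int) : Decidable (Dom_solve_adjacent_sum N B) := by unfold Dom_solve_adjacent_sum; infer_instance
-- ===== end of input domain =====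

-- B replaces A's search over all candidate first elements (each checked by rebuilding the
-- array) with a single greedy pass starting at first = 1; sortedness makes first = 1 always
-- feasible when B[0] ≥ 2.  Equivalence is about the RETURN value; both Pythons sort B in place.

-- ===== PORT A =====
-- inner loop: 'for i in range(N-1): next = B[i] - A[-1]; if next <= 0: break; A.append(next)'
-- state = (A, is_valid); pyGet? = none (Python IndexError, outside Pre_) is mapped to an
-- invalid break (arbitrary: nothing is claimed there).
def pvInnerA (bs : List Int) (acc : List Int) : List Int → List Int × Bool
  | [] => (acc, true)
  | i :: rest =>
    match PySem.List.pyGet? acc (-1) with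
    | none => (acc, false)
    | some last =>
      match PySem.List.pyGet? bs i with
      | none => (acc, false)
      | some bi =>
        let next := bi - last
        if next ≤ 0 then (acc, false)
        else pvInnerA bs (acc ++ [next]) rest

-- outer loop: 'for first in range(1, B[0]): … if is_valid and len(A) == N: return A'
def pvOuterA (N : Int) (bs : List Int) : List Int → Option (List Int)
  | [] => none
  | f :: rest =>
    let r := pvInnerA bs [f] (PySem.List.pyRange 0 (N - 1) 1)
    if r.2 && ((r.1.length : Int) == N) then some r.1 else pvOuterA N bs rest

def solve_adjacent_sum (N : Int) (B : List Int) : Option (List Int) :=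
  let bs := PySem.List.sorted B (fun x => x) false
  match PySem.List.pyGet? bs 0 with
  | none => none                      -- B[0] : IndexError (outside Pre_)
  | some b0 => pvOuterA N bs (PySem.List.pyRange 1 b0 1)

-- ===== PORT B =====
-- 'prev = 1; for b in B[:N-1]: prev = b - prev; res.append(prev)'
def pvBuildB (prev : Int) : List Int → List Int
  | [] => []
  | b :: rest => (b - prev) :: pvBuildB (b - prev) rest

def solve_adjacent_sum_alt (N : Int) (B : List Int) : Option (List Int) :=
  let bs := PySem.List.sorted B (fun x => x) false
  if N < 1 then none
  else match bs with
    | [] => none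
    | b0 :: _ =>
      if b0 < 2 then none
      else some (1 :: pvBuildB 1 (PySem.List.slice bs none (some (N - 1))))

-- ===== PRECONDITION & SPEC =====
-- Pre_ excludes exactly the inputs on which A raises IndexError: an empty B (B[0]), and a B
-- shorter than N-1 all of whose elements are ≥ 2 (the inner loop then runs off the end of B).
def Pre_solve_adjacent_sum (N : Int) (B : List Int) : Prop :=
  B ≠ [] ∧ (N - 1 ≤ (B.length : Int) ∨ ∃ b ∈ B, b ≤ 1)
instance (N : Int) (B : List Int) : Decidable (Pre_solve_adjacent_sum N B) := by
  unfold Pre_solve_adjacent_sum; infer_instance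
def pvWitness_solve_adjacent_sum : Int × List Int := (3, [5, 2, 4])

def Spec_solve_adjacent_sum (N : Int) (B : List Int) (out : Option (List Int)) : Prop := out = solve_adjacent_sum_alt N B
instance (N : Int) (B : List Int) (out : Option (List Int)) : Decidable (Spec_solve_adjacent_sum N B out) := by unfold Spec_solve_adjacent_sum; infer_instance

-- ===== CLAIM (what is proved, stated in full; the proofs are below) =====
def Claim_equal_solve_adjacent_sum : Prop := ∀ (N : Int) (B : List Int), Dom_solve_adjacent_sum N B → Pre_solve_adjacent_sum N B → Spec_solve_adjacent_sum N B (solve_adjacent_sum N B)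

-- ===== LEMMAS AND PROOFS =====

theorem pvBuildB_length (prev : Int) (ds : List Int) :
    (pvBuildB prev ds).length = ds.length := by
  induction ds generalizing prev with
  | nil => rfl
  | cons b rest ih => simp [pvBuildB, ih]

-- Core invariant: with bs pairwise nondecreasing and last accumulated value L, 1 <= L and
-- L + 1 <= bs[k], the inner loop never breaks and appends exactly pvBuildB L of bs[k:m].
theorem pvInnerA_run (bs : List Int) (hpair : bs.Pairwise (· ≤ ·)) (m : Int)
    (hm : m ≤ (bs.length : Int)) :
    ∀ n : Nat, ∀ k : Int, 0 ≤ k → (m - k).toNat = n →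
      ∀ (acc : List Int) (L : Int), PySem.List.pyGet? acc (-1) = some L → 1 ≤ L →
      (∀ hlt : k.toNat < bs.length, k < m → L + 1 ≤ bs[k.toNat]) →
      pvInnerA bs acc (PySem.List.pyRange k m 1)
        = (acc ++ pvBuildB L ((bs.drop k.toNat).take n), true) := by
  intro n
  induction n with
  | zero =>
    intro k hk hn acc L hL h1 _
    rw [PySem.List.pyRange_one_eq_nil (by omega : m ≤ k)]
    simp [pvInnerA, pvBuildB]
  | succ n ih =>
    intro k hk hn acc L hL h1 hbd
    have hkm : k < m := by omega
    have hklen : k.toNat < bs.length := by omega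
    rw [PySem.List.pyRange_one_cons hkm]
    have hget : PySem.List.pyGet? bs k = some (bs[k.toNat]'hklen) :=
      PySem.List.pyGet?_eq_some_getElem bs hk (by omega)
    have hbk := hbd hklen hkm
    have hnext : ¬ (bs[k.toNat]'hklen - L ≤ 0) := by omega
    simp only [pvInnerA, hL, hget, hnext, if_false]
    have hmono : ∀ hlt : (k+1).toNat < bs.length, k + 1 < m →
        bs[k.toNat]'hklen - L + 1 ≤ bs[(k+1).toNat] := by
      intro hlt _
      have hle : bs[k.toNat]'hklen ≤ bs[(k+1).toNat] :=
        List.pairwise_iff_getElem.mp hpair _ _ hklen hlt (by omega)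
      omega
    have hrec := ih (k + 1) (by omega) (by omega) (acc ++ [bs[k.toNat]'hklen - L])
      (bs[k.toNat]'hklen - L) (PySem.List.pyGet?_neg_one_append_singleton acc _)
      (by omega) hmono
    rw [hrec]
    have hsucc : (k + 1).toNat = k.toNat + 1 := by omega
    rw [hsucc]
    conv_rhs => rw [List.drop_eq_getElem_cons hklen]
    simp only [List.take_succ_cons, pvBuildB]
    simp [List.append_assoc]

-- With N < 1 the outer loop always returns none: len(A) = 1 ≠ N for every candidate.
theorem pvOuterA_none_of_neg (N : Int) (hN : N < 1) (bs : List Int) :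
    ∀ fs : List Int, pvOuterA N bs fs = none := by
  intro fs
  induction fs with
  | nil => rfl
  | cons f rest ih =>
    have hrange : PySem.List.pyRange 0 (N - 1) 1 = [] :=
      PySem.List.pyRange_one_eq_nil (by omega)
    have h1 : ¬ ((1 : Int) = N) := by omega
    simp [pvOuterA, hrange, pvInnerA, h1, ih]

theorem solve_adjacent_sum_eq (N : Int) (B : List Int)
    (hpre : Pre_solve_adjacent_sum N B) :
    solve_adjacent_sum N B = solve_adjacent_sum_alt N B := by
  obtain ⟨hne, hlen⟩ := hpre
  have hbsne : PySem.List.sorted B (fun x => x) false ≠ [] := by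
    intro h
    have hp := PySem.List.sorted_perm B (fun x => x) false
    rw [h] at hp
    exact hne hp.symm.eq_nil
  obtain ⟨b0, tl, hcons⟩ := List.exists_cons_of_ne_nil hbsne
  have hpair : (b0 :: tl).Pairwise (· ≤ ·) := by
    have h := PySem.List.sorted_pairwise B (fun x => x)
    rw [hcons] at h
    simpa using h
  have hlenB : (b0 :: tl).length = B.length := by
    have h := (PySem.List.sorted_perm B (fun x => x) false).length_eq
    rw [hcons] at h
    exact h
  simp only [solve_adjacent_sum, solve_adjacent_sum_alt, hcons, PySem.List.pyGet?_zero_cons]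
  by_cases hN : N < 1
  · simp only [hN, if_true]
    exact pvOuterA_none_of_neg N hN _ _
  · simp only [hN, if_false]
    by_cases hb0 : b0 < 2
    · simp only [hb0, if_true]
      rw [PySem.List.pyRange_one_eq_nil (by omega : b0 ≤ 1)]
      rfl
    · simp only [hb0, if_false]
      have hmin : ∀ y ∈ B, b0 ≤ y := PySem.List.key_head_sorted_le B (fun x => x) hcons
      have hlen' : N - 1 ≤ ((b0 :: tl).length : Int) := by
        rcases hlen with h | ⟨b, hb, hb1⟩
        · rw [hlenB]; exact h
        · exact absurd (hmin b hb) (by omega)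
      rw [PySem.List.pyRange_one_cons (by omega : (1:Int) < b0)]
      have hrun := pvInnerA_run (b0 :: tl) hpair (N - 1) hlen' (N - 1).toNat 0 le_rfl
        (by omega) [1] 1 rfl le_rfl
        (by intro _ _; simp only [Int.toNat_zero, List.getElem_cons_zero]; omega)
      have htake : (((b0 :: tl).drop (0:Int).toNat).take (N-1).toNat)
          = (b0 :: tl).take (N-1).toNat := by simp
      rw [htake] at hrun
      simp only [pvOuterA, hrun]
      have hlen2 : ((([1] ++ pvBuildB 1 ((b0 :: tl).take (N-1).toNat)).length : Int)) = N := by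
        have hlen'' : N - 1 ≤ (tl.length : Int) + 1 := by simpa using hlen'
        simp only [List.length_append, List.length_cons, List.length_nil, pvBuildB_length,
          List.length_take]
        omega
      have hslice : PySem.List.slice (b0 :: tl) none (some (N - 1))
          = (b0 :: tl).take (N-1).toNat := by
        have h1 : N - 1 = (((N-1).toNat : Nat) : Int) := by omega
        conv_lhs => rw [h1]
        rw [PySem.List.slice_to_natCast]
      rw [hslice]
      split
      · rfl
      · next h =>
        exfalso
        simp only [Bool.true_and, beq_iff_eq] at h
        exact h hlen2

-- ===== VERDICT (by name: the statement is the Claim_ definition above) =====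
theorem solve_adjacent_sum_spec : Claim_equal_solve_adjacent_sum := by
  intro N B _ hpre
  exact solve_adjacent_sum_eq N B hpre
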